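-- pv_equiv track=rewrite | github.com/mikehacksthings/dev-help-wanted | main.py | vowel_captilization
-- ===== SOURCE A (Python) =====
-- def vowel_captilization(string: str) -> str:
--     """ capitalize all vowels in a string and lowercase all consonants
--
--     Args:
--         string (str): string to capitalize
--
--     Returns:
--         str: string with all vowels capitalized and all consonants lowercased
--     """
--     #TODO: implement this function
--     vowels = ['a', 'e', 'i', 'o', 'u']
--     ret = ""
--     for c in string:
--         if c.lower() in vowels:
--             ret += c.upper()
--         else:
--             ret += c.lower()
--     return ret
-- ===== SOURCE B (Python) =====
-- def vowel_captilization(string: str) -> str: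
--     """capitalize all vowels in a string and lowercase all consonants"""
--     return string.lower().translate(str.maketrans("aeiou", "AEIOU"))
-- ===== Notes on version B (the rewrite author's own statement) =====
-- stated objective: simpler
-- what changed: Replaces the per-character branch-and-append loop by a two-step pipeline: lowercase the whole string once, then remap the five ASCII vowels with str.translate.
import Mathlib
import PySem

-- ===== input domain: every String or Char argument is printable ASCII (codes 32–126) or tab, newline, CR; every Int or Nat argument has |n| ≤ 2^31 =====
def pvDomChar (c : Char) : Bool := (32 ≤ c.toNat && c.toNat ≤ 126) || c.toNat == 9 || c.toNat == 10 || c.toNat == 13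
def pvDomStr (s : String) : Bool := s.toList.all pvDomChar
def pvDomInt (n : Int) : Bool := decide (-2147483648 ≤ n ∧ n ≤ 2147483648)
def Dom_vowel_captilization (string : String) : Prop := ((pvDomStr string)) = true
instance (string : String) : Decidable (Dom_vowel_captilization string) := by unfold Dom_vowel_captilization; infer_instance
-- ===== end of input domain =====

-- B replaces A's per-character branch-and-append loop by a simpler pipeline: lowercase the whole string once, then remap the five ASCII vowels via a translate table.


-- ===== PORT A =====
-- for c in string: if c.lower() in vowels: ret += c.upper() else: ret += c.lower()
def vowel_captilization (string : String) : String :=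
  let vowels : List Char := ['a', 'e', 'i', 'o', 'u']
  string.toList.foldl
    (fun ret c =>
      if vowels.contains (PySem.Chars.lowerChar c) then ret.push (PySem.Chars.upperChar c)
      else ret.push (PySem.Chars.lowerChar c))
    ""

-- ===== PORT B =====
-- string.lower().translate(str.maketrans("aeiou", "AEIOU")): the maketrans table as an
-- association list, translate = map the table lookup (identity when absent) over the lowered string
def vowel_captilization_alt (string : String) : String :=
  let table : List (Char × Char) := List.zip "aeiou".toList "AEIOU".toList
  String.ofList ((PySem.Str.lower string).toList.map
    (fun c => match table.find? (fun p => p.1 == c) with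
              | some p => p.2
              | none => c))

-- ===== PRECONDITION & SPEC =====
def Spec_vowel_captilization (string : String) (out : String) : Prop := out = vowel_captilization_alt string
instance (string : String) (out : String) : Decidable (Spec_vowel_captilization string out) := by unfold Spec_vowel_captilization; infer_instance

-- ===== CLAIM (what is proved, stated in full; the proofs are below) =====
def Claim_equal_vowel_captilization : Prop := ∀ (string : String), Dom_vowel_captilization string → Spec_vowel_captilization string (vowel_captilization string)

-- ===== LEMMAS AND PROOFS =====

-- the per-character function B applies
def pvTrans (c : Char) : Char :=
  match (List.zip "aeiou".toList "AEIOU".toList).find? (fun p => p.1 == c) with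
  | some p => p.2
  | none => c

-- pointwise agreement of the two per-character treatments, for all chars below 128
lemma pv_point_lt128 : ∀ n : Nat, n < 128 →
    pvTrans (PySem.Chars.lowerChar (Char.ofNat n)) =
      (if (['a','e','i','o','u'] : List Char).contains (PySem.Chars.lowerChar (Char.ofNat n))
       then PySem.Chars.upperChar (Char.ofNat n) else PySem.Chars.lowerChar (Char.ofNat n)) := by
  decide

lemma pv_point (c : Char) (h : pvDomChar c = true) :
    pvTrans (PySem.Chars.lowerChar c) =
      (if (['a','e','i','o','u'] : List Char).contains (PySem.Chars.lowerChar c)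
       then PySem.Chars.upperChar c else PySem.Chars.lowerChar c) := by
  have hlt : c.toNat < 128 := by
    unfold pvDomChar at h
    simp only [Bool.or_eq_true, Bool.and_eq_true, decide_eq_true_eq, beq_iff_eq] at h
    omega
  have := pv_point_lt128 c.toNat hlt
  rwa [Char.ofNat_toNat] at this

-- A's fold, characterised: it appends the pointwise image to the accumulator
lemma pv_foldA (l : List Char) (acc : String) (h : l.all pvDomChar = true) :
    l.foldl
      (fun ret c =>
        if (['a','e','i','o','u'] : List Char).contains (PySem.Chars.lowerChar c) then ret.push (PySem.Chars.upperChar c)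
        else ret.push (PySem.Chars.lowerChar c))
      acc = acc ++ String.ofList (l.map (fun c => pvTrans (PySem.Chars.lowerChar c))) := by
  induction l generalizing acc with
  | nil => simp
  | cons c t ih =>
    simp only [List.all_cons, Bool.and_eq_true] at h
    simp only [List.foldl_cons, List.map_cons, ih _ h.2, pv_point c h.1]
    split_ifs with hc <;>
      · apply String.ext
        simp

-- ===== VERDICT (by name: the statement is the Claim_ definition above) =====
theorem vowel_captilization_spec : Claim_equal_vowel_captilization := by
  intro s hdom
  unfold Spec_vowel_captilization vowel_captilization vowel_captilization_alt
  rw [pv_foldA s.toList "" hdom]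
  simp only [PySem.Str.lower, PySem.Chars.lower, pvTrans, String.toList_ofList, List.map_map]
  rfl
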